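-- pv_equiv track=rewrite | github.com/sealinglip/leecode | 3235. 判断矩形的两个角落是否可达.py | canReachCorner
-- ===== SOURCE A (Python) =====
-- from typing import List
--
-- class UnionFind:
--     def __init__(self, n: int):
--         self.group = list(range(n))
--
--     def findGroup(self, x: int) -> int:
--         if self.group[x] == x:
--             return x
--         self.group[x] = self.findGroup(self.group[x])
--         return self.group[x]
--
--     def union(self, x: int, y: int):
--         x, y = self.findGroup(x), self.findGroup(y)
--         if x != y:
--             self.group[x] = y
--
--     def isConnected(self, x: int, y: int) -> bool:
--         return self.findGroup(x) == self.findGroup(y)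
--
-- def canReachCorner(xCorner: int, yCorner: int, circles: List[List[int]]) -> bool:
--     # 连通图 + 并查集
--     # 四条边和每个圆都相当于一个图元，如果两个图元相交或接触，说明它们是连通的，连通关系可以传递
--     # 当下列图元最终处于连通状态时，返回False，否则返回True：
--     # 左边-右边，左边-下边，上边-右边，上边-下边
--     n = len(circles)
--     # n ~ n + 3 分别代表矩阵的上右下左
--     uf = UnionFind(n + 4)
--
--     for i, (x, y, r) in enumerate(circles):
--         # 先排除掉完全在矩形外的圆，以免连通是在矩形外发生的，影响判断
--         if x - r >= xCorner or y - r >= yCorner: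
--             continue
--
--         # 判断跟之前的圆相不相交
--         for j in range(i):
--             xj, yj, rj = circles[j]
--             # 只有两个圆相交区域跟矩形有交集，才做合并
--             if (xj - x) ** 2 + (yj - y) ** 2 <= (rj + r) ** 2 and x * rj + xj * r < (r + rj) * xCorner and y * rj + yj * r < (r + rj) * yCorner:
--                 uf.union(i, j)
--
--         # 判断圆跟四边相不相交
--         # 判断圆和线段相不相交比想像的复杂
--         # 判断和左相不相交
--         if x <= r and (y <= yCorner or (x ** 2 + (y - yCorner) ** 2 <= r ** 2)):
--             uf.union(i, n+3)
--         # 判断和下相不相交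
--         if y <= r and (x <= xCorner or ((x - xCorner) ** 2 + y ** 2 <= r ** 2)):
--             uf.union(i, n+2)
--         # 判断和右相不相交
--         if xCorner - r <= x <= xCorner + r and (y <= yCorner or ((x - xCorner) ** 2 + (y - yCorner) ** 2 <= r ** 2)):
--             uf.union(i, n+1)
--         # 判断和上相不相交
--         if yCorner - r <= y <= yCorner + r and (x <= xCorner or ((x - xCorner) ** 2 + (y - yCorner) ** 2 <= r ** 2)):
--             uf.union(i, n)
--
--     return not (uf.isConnected(n, n+1) or uf.isConnected(n, n+2) or uf.isConnected(n+3, n+2) or uf.isConnected(n+3, n+1))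
-- ===== SOURCE B (Python) =====
-- def canReachCorner(xCorner, yCorner, circles):
--     # Alternative algorithm: instead of a union-find with path compression,
--     # collect the contact pairs (circle-circle and circle-edge, same geometric
--     # predicates) into an explicit edge list over nodes 0..n+3 (n..n+3 = the
--     # top/right/bottom/left edge sentinels), then compute connected components
--     # by whole-array colour relabelling: each merge repaints one colour class.
--     n = len(circles)
--     pairs = []
--     for i, (x, y, r) in enumerate(circles):
--         if x - r >= xCorner or y - r >= yCorner:
--             continue
--         for j in range(i):
--             xj, yj, rj = circles[j]
--             if (xj - x) ** 2 + (yj - y) ** 2 <= (rj + r) ** 2 and x * rj + xj * r < (r + rj) * xCorner and y * rj + yj * r < (r + rj) * yCorner: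
--                 pairs.append((i, j))
--         if x <= r and (y <= yCorner or (x ** 2 + (y - yCorner) ** 2 <= r ** 2)):
--             pairs.append((i, n + 3))
--         if y <= r and (x <= xCorner or ((x - xCorner) ** 2 + y ** 2 <= r ** 2)):
--             pairs.append((i, n + 2))
--         if xCorner - r <= x <= xCorner + r and (y <= yCorner or ((x - xCorner) ** 2 + (y - yCorner) ** 2 <= r ** 2)):
--             pairs.append((i, n + 1))
--         if yCorner - r <= y <= yCorner + r and (x <= xCorner or ((x - xCorner) ** 2 + (y - yCorner) ** 2 <= r ** 2)):
--             pairs.append((i, n))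
--     comp = list(range(n + 4))
--     for a, b in pairs:
--         ca, cb = comp[a], comp[b]
--         if ca != cb:
--             comp = [cb if c == ca else c for c in comp]
--     return not (comp[n] == comp[n + 1] or comp[n] == comp[n + 2]
--                 or comp[n + 3] == comp[n + 2] or comp[n + 3] == comp[n + 1])
-- ===== Notes on version B (the rewrite author's own statement) =====
-- stated objective: alternative
-- what changed: The union-find with path compression is replaced by an explicit contact-edge list over nodes 0..n+3 whose connected components are computed by whole-array colour relabelling (each merge repaints one colour class); the geometric contact predicates are unchanged.
import Mathlib
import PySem

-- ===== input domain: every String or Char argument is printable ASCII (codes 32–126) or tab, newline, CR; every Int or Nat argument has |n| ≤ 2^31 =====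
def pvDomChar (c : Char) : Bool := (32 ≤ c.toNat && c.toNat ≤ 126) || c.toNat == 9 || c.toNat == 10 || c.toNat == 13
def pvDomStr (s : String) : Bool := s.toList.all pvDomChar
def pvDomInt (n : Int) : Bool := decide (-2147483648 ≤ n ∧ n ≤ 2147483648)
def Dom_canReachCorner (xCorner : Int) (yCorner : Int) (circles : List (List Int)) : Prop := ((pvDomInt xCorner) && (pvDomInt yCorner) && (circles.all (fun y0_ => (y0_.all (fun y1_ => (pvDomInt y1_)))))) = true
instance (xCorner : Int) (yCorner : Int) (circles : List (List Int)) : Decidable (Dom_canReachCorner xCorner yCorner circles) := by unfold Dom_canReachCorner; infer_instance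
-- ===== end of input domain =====

-- B replaces A's union-find (path compression) by an explicit contact-edge list whose
-- components are computed by whole-array colour relabelling; same geometric predicates.

-- ===== PORT A =====
-- UnionFind.findGroup: recursive find with path compression; the list is the `group`
-- array, the result pairs the root with the updated array.  Python's recursion always
-- terminates because `group` is a forest; the fuel `g.length` is proved sufficient below.
def ufFind : Nat → List Nat → Nat → Nat × List Nat
  | 0, g, x => (x, g)
  | fuel+1, g, x =>
    let p := g.getD x x
    if p = x then (x, g)
    else
      let res := ufFind fuel g p
      (res.1, res.2.set x res.1)

-- UnionFind.union
def ufUnion (g : List Nat) (a b : Nat) : List Nat :=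
  let ra := ufFind g.length g a
  let rb := ufFind ra.2.length ra.2 b
  if ra.1 ≠ rb.1 then rb.2.set ra.1 rb.1 else rb.2

-- UnionFind.isConnected (threads the mutated array)
def ufConn (g : List Nat) (a b : Nat) : Bool × List Nat :=
  let ra := ufFind g.length g a
  let rb := ufFind ra.2.length ra.2 b
  (ra.1 == rb.1, rb.2)

-- inner loop `for j in range(i): ...`
def aInner (xCorner yCorner : Int) (circles : List (List Int)) (i : Nat) (x y r : Int) (g : List Nat) : List Nat :=
  (List.range i).foldl (fun g j =>
    match circles.getD j [] with
    | [xj, yj, rj] =>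
      if (xj - x)^2 + (yj - y)^2 ≤ (rj + r)^2 ∧ x*rj + xj*r < (r+rj)*xCorner ∧ y*rj + yj*r < (r+rj)*yCorner
      then ufUnion g i j else g
    | _ => g) g

-- one iteration of the main loop, for (circle, i)
def aStep (xCorner yCorner : Int) (circles : List (List Int)) (n : Nat) (g : List Nat) (ic : List Int × Nat) : List Nat :=
  match ic with
  | ([x, y, r], i) =>
    if xCorner ≤ x - r ∨ yCorner ≤ y - r then g
    else
      let g1 := aInner xCorner yCorner circles i x y r g
      let g2 := if x ≤ r ∧ (y ≤ yCorner ∨ x^2 + (y - yCorner)^2 ≤ r^2) then ufUnion g1 i (n+3) else g1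
      let g3 := if y ≤ r ∧ (x ≤ xCorner ∨ (x - xCorner)^2 + y^2 ≤ r^2) then ufUnion g2 i (n+2) else g2
      let g4 := if (xCorner - r ≤ x ∧ x ≤ xCorner + r) ∧ (y ≤ yCorner ∨ (x - xCorner)^2 + (y - yCorner)^2 ≤ r^2) then ufUnion g3 i (n+1) else g3
      if (yCorner - r ≤ y ∧ y ≤ yCorner + r) ∧ (x ≤ xCorner ∨ (x - xCorner)^2 + (y - yCorner)^2 ≤ r^2) then ufUnion g4 i n else g4
  | _ => g

def canReachCorner (xCorner : Int) (yCorner : Int) (circles : List (List Int)) : Bool :=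
  let n := circles.length
  let g := circles.zipIdx.foldl (aStep xCorner yCorner circles n) (List.range (n+4))
  let c1 := ufConn g n (n+1)
  let c2 := ufConn c1.2 n (n+2)
  let c3 := ufConn c2.2 (n+3) (n+2)
  let c4 := ufConn c3.2 (n+3) (n+1)
  !(c1.1 || c2.1 || c3.1 || c4.1)

-- ===== PORT B =====
-- inner loop of B: append qualifying circle-circle pairs
def bInner (xCorner yCorner : Int) (circles : List (List Int)) (i : Nat) (x y r : Int) (ps : List (Nat × Nat)) : List (Nat × Nat) :=
  (List.range i).foldl (fun ps j =>
    match circles.getD j [] with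
    | [xj, yj, rj] =>
      if (xj - x)^2 + (yj - y)^2 ≤ (rj + r)^2 ∧ x*rj + xj*r < (r+rj)*xCorner ∧ y*rj + yj*r < (r+rj)*yCorner
      then ps ++ [(i, j)] else ps
    | _ => ps) ps

-- one iteration of B's pair-collecting loop
def bStep (xCorner yCorner : Int) (circles : List (List Int)) (n : Nat) (ps : List (Nat × Nat)) (ic : List Int × Nat) : List (Nat × Nat) :=
  match ic with
  | ([x, y, r], i) =>
    if xCorner ≤ x - r ∨ yCorner ≤ y - r then ps
    else
      let p1 := bInner xCorner yCorner circles i x y r ps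
      let p2 := if x ≤ r ∧ (y ≤ yCorner ∨ x^2 + (y - yCorner)^2 ≤ r^2) then p1 ++ [(i, n+3)] else p1
      let p3 := if y ≤ r ∧ (x ≤ xCorner ∨ (x - xCorner)^2 + y^2 ≤ r^2) then p2 ++ [(i, n+2)] else p2
      let p4 := if (xCorner - r ≤ x ∧ x ≤ xCorner + r) ∧ (y ≤ yCorner ∨ (x - xCorner)^2 + (y - yCorner)^2 ≤ r^2) then p3 ++ [(i, n+1)] else p3
      if (yCorner - r ≤ y ∧ y ≤ yCorner + r) ∧ (x ≤ xCorner ∨ (x - xCorner)^2 + (y - yCorner)^2 ≤ r^2) then p4 ++ [(i, n)] else p4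
  | _ => ps

-- repaint the colour class of a to b's colour
def relabel (comp : List Nat) (p : Nat × Nat) : List Nat :=
  let ca := comp.getD p.1 0
  let cb := comp.getD p.2 0
  if ca ≠ cb then comp.map (fun c => if c = ca then cb else c) else comp

def canReachCorner_alt (xCorner : Int) (yCorner : Int) (circles : List (List Int)) : Bool :=
  let n := circles.length
  let pairs := circles.zipIdx.foldl (bStep xCorner yCorner circles n) []
  let comp := pairs.foldl relabel (List.range (n+4))
  !((comp.getD n 0 == comp.getD (n+1) 0) || (comp.getD n 0 == comp.getD (n+2) 0)
    || (comp.getD (n+3) 0 == comp.getD (n+2) 0) || (comp.getD (n+3) 0 == comp.getD (n+1) 0))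

-- ===== PRECONDITION & SPEC =====
-- Pre_ excludes exactly the inputs on which Python A raises: a circle that is not a
-- 3-element list makes the tuple unpacking `x, y, r = ...` raise ValueError.
def Pre_canReachCorner (xCorner : Int) (yCorner : Int) (circles : List (List Int)) : Prop :=
  ∀ c ∈ circles, c.length = 3
instance (xCorner : Int) (yCorner : Int) (circles : List (List Int)) : Decidable (Pre_canReachCorner xCorner yCorner circles) := by unfold Pre_canReachCorner; infer_instance

def pvWitness_canReachCorner : Int × Int × List (List Int) := (3, 4, [[2, 2, 1]])

def Spec_canReachCorner (xCorner : Int) (yCorner : Int) (circles : List (List Int)) (out : Bool) : Prop := out = canReachCorner_alt xCorner yCorner circles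
instance (xCorner : Int) (yCorner : Int) (circles : List (List Int)) (out : Bool) : Decidable (Spec_canReachCorner xCorner yCorner circles out) := by unfold Spec_canReachCorner; infer_instance

-- ===== CLAIM (what is proved, stated in full; the proofs are below) =====
def Claim_equal_canReachCorner : Prop := ∀ (xCorner : Int) (yCorner : Int) (circles : List (List Int)), Dom_canReachCorner xCorner yCorner circles → Pre_canReachCorner xCorner yCorner circles → Spec_canReachCorner xCorner yCorner circles (canReachCorner xCorner yCorner circles)

-- ===== LEMMAS AND PROOFS =====

-- ---- generic union-find theory over a parent list ----
def stepF (g : List Nat) (x : Nat) : Nat := g.getD x x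
def rootS (g : List Nat) (x : Nat) : Nat := (stepF g)^[g.length] x
def IsFixP (g : List Nat) (x : Nat) : Prop := stepF g x = x
def InvUF (g : List Nat) : Prop :=
  ∃ rk : Nat → Nat, ∀ x, x < g.length →
    stepF g x < g.length ∧ (stepF g x ≠ x → rk x < rk (stepF g x))

lemma stepF_of_ge {g : List Nat} {x : Nat} (h : g.length ≤ x) : stepF g x = x := by
  simp [stepF, List.getD_eq_getElem?_getD, List.getElem?_eq_none h]

lemma lt_of_not_fix {g : List Nat} {x : Nat} (h : ¬ IsFixP g x) : x < g.length := by
  by_contra hx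
  exact h (stepF_of_ge (Nat.le_of_not_lt hx))

lemma iter_lt {g : List Nat} (hInv : InvUF g) {x : Nat} (hx : x < g.length) :
    ∀ k, (stepF g)^[k] x < g.length := by
  obtain ⟨rk, hrk⟩ := hInv
  intro k
  induction k with
  | zero => simpa using hx
  | succ k ih =>
    rw [Function.iterate_succ_apply']
    exact (hrk _ ih).1

lemma rk_le_iter {g : List Nat} {rk : Nat → Nat}
    (hrk : ∀ x, x < g.length → stepF g x < g.length ∧ (stepF g x ≠ x → rk x < rk (stepF g x))) :
    ∀ k x, x < g.length → rk x ≤ rk ((stepF g)^[k] x) := by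
  intro k
  induction k with
  | zero => intro x _; simp
  | succ k ih =>
    intro x hx
    rw [Function.iterate_succ_apply]
    rcases eq_or_ne (stepF g x) x with h | h
    · rw [h]; exact ih x hx
    · exact le_trans (le_of_lt ((hrk x hx).2 h)) (ih _ (hrk x hx).1)

lemma exists_fix {g : List Nat} (hInv : InvUF g) (hlen : 0 < g.length) (x : Nat) :
    ∃ k < g.length, IsFixP g ((stepF g)^[k] x) := by
  by_cases hx : x < g.length
  · by_contra hcon
    push_neg at hcon
    obtain ⟨rk, hrk⟩ := hInv
    have hmono : ∀ j, j ≤ g.length → ∀ i, i < j →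
        rk ((stepF g)^[i] x) < rk ((stepF g)^[j] x) := by
      intro j
      induction j with
      | zero => intro _ i hi; omega
      | succ j ihj =>
        intro hj i hi
        have hjlt : j < g.length := hj
        have hstep : rk ((stepF g)^[j] x) < rk ((stepF g)^[j+1] x) := by
          rw [Function.iterate_succ_apply']
          have hltj : (stepF g)^[j] x < g.length := iter_lt ⟨rk, hrk⟩ hx j
          exact (hrk _ hltj).2 (hcon j hjlt)
        rcases Nat.lt_or_ge i j with h | h
        · exact lt_trans (ihj (le_of_lt hjlt) i h) hstep
        · have : i = j := by omega
          subst this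
          exact hstep
    have hmaps : ∀ i ∈ Finset.range (g.length + 1),
        (stepF g)^[i] x ∈ Finset.range g.length := by
      intro i _
      simpa using iter_lt ⟨rk, hrk⟩ hx i
    have hinj : Set.InjOn (fun i => (stepF g)^[i] x) (Finset.range (g.length + 1)) := by
      intro i hi j hj heq
      simp only [Finset.coe_range, Set.mem_Iio] at hi hj
      simp only at heq
      by_contra hne
      rcases Nat.lt_or_ge i j with h | h
      · have := hmono j (by omega) i h
        rw [heq] at this
        omega
      · have hji : j < i := by omega
        have := hmono i (by omega) j hji
        rw [heq] at this
        omega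
    have := Finset.card_le_card_of_injOn _ hmaps hinj
    simp at this
  · exact ⟨0, hlen, stepF_of_ge (Nat.le_of_not_lt hx)⟩

lemma reach_root {g : List Nat} (hInv : InvUF g) (hlen : 0 < g.length) {x j w : Nat}
    (hw : (stepF g)^[j] x = w) (hfix : IsFixP g w) : rootS g x = w := by
  haveI : DecidablePred (fun k => IsFixP g ((stepF g)^[k] x)) :=
    fun k => show Decidable (stepF g ((stepF g)^[k] x) = (stepF g)^[k] x) from inferInstance
  obtain ⟨k0, hk0len, hk0⟩ := exists_fix hInv hlen x
  have hex : ∃ k, IsFixP g ((stepF g)^[k] x) := ⟨k0, hk0⟩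
  have hd := Nat.find_spec hex
  set d := Nat.find hex with hdd
  have hdlen : d ≤ g.length := le_trans (Nat.find_min' hex hk0) (le_of_lt hk0len)
  have hconst : ∀ m, d ≤ m → (stepF g)^[m] x = (stepF g)^[d] x := by
    intro m hm
    rw [show m = (m - d) + d by omega, Function.iterate_add_apply]
    exact Function.iterate_fixed hd _
  rcases Nat.lt_or_ge j d with h | h
  · exact absurd (hw ▸ hfix) (Nat.find_min hex h)
  · rw [← hw, hconst j h]
    unfold rootS
    exact (hconst g.length hdlen)

lemma root_isFix {g : List Nat} (hInv : InvUF g) (hlen : 0 < g.length) (x : Nat) :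
    IsFixP g (rootS g x) := by
  obtain ⟨k, _, hk⟩ := exists_fix hInv hlen x
  rw [reach_root hInv hlen rfl hk]
  exact hk

lemma root_of_fix {g : List Nat} {x : Nat} (h : IsFixP g x) : rootS g x = x :=
  Function.iterate_fixed h _

lemma step_root {g : List Nat} (hInv : InvUF g) (hlen : 0 < g.length) (x : Nat) :
    rootS g x = rootS g (stepF g x) := by
  have hfix := root_isFix hInv hlen (stepF g x)
  refine reach_root hInv hlen (j := g.length + 1) ?_ hfix
  rw [Function.iterate_succ_apply]
  rfl

lemma step_set_ne {g : List Nat} {x r z : Nat} (h : z ≠ x) : stepF (g.set x r) z = stepF g z := by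
  simp [stepF, List.getD_eq_getElem?_getD, List.getElem?_set_ne (Ne.symm h)]

lemma step_set_self {g : List Nat} {x r : Nat} (hx : x < g.length) : stepF (g.set x r) x = r := by
  simp [stepF, List.getD_eq_getElem?_getD, List.getElem?_set_self, hx]

lemma root_ext {g g' : List Nat} (hlen : g'.length = g.length)
    (h : ∀ z, stepF g' z = stepF g z) : ∀ z, rootS g' z = rootS g z := by
  intro z
  unfold rootS
  rw [hlen, funext h]

lemma inv_ext {g g' : List Nat} (hlen : g'.length = g.length)
    (h : ∀ z, stepF g' z = stepF g z) (hInv : InvUF g) : InvUF g' := by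
  obtain ⟨rk, hrk⟩ := hInv
  exact ⟨rk, fun x hx => by rw [hlen] at hx ⊢; rw [h x]; exact hrk x hx⟩

lemma set_root {g : List Nat} (hInv : InvUF g) (hlen : 0 < g.length) {x r : Nat}
    (hr : r = rootS g x) :
    (g.set x r).length = g.length ∧ InvUF (g.set x r) ∧
      ∀ z, rootS (g.set x r) z = rootS g z := by
  have hlenset : (g.set x r).length = g.length := by simp
  by_cases hfx : IsFixP g x
  · have hrx : r = x := by rw [hr, root_of_fix hfx]
    have hsteps : ∀ z, stepF (g.set x r) z = stepF g z := by
      intro z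
      rcases eq_or_ne z x with rfl | h
      · rcases Nat.lt_or_ge z g.length with hz | hz
        · rw [step_set_self hz, hrx]
          exact hfx.symm
        · rw [List.set_eq_of_length_le hz]
      · exact step_set_ne h
    exact ⟨hlenset, inv_ext hlenset hsteps hInv, root_ext hlenset hsteps⟩
  · have hxlt := lt_of_not_fix hfx
    obtain ⟨rk, hrk⟩ := hInv
    have hrlt : r < g.length := by
      rw [hr]
      exact iter_lt ⟨rk, hrk⟩ hxlt g.length
    have hrkxr : rk x < rk r := by
      have h1 : rk x < rk (stepF g x) := (hrk x hxlt).2 hfx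
      have h2 : rk (stepF g x) ≤ rk ((stepF g)^[g.length - 1] (stepF g x)) :=
        rk_le_iter hrk _ _ (hrk x hxlt).1
      have h3 : (stepF g)^[g.length - 1] (stepF g x) = rootS g x := by
        unfold rootS
        rw [← Function.iterate_succ_apply]
        congr 1
        omega
      rw [h3, ← hr] at h2
      omega
    have hrne : r ≠ x := by
      intro h
      rw [h] at hrkxr
      omega
    have hinv' : InvUF (g.set x r) := by
      refine ⟨rk, fun u hu => ?_⟩
      rw [hlenset] at hu
      rcases eq_or_ne u x with rfl | hune
      · rw [step_set_self hu, hlenset]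
        exact ⟨hrlt, fun _ => hrkxr⟩
      · rw [step_set_ne hune, hlenset]
        exact hrk u hu
    have hlen' : 0 < (g.set x r).length := by rw [hlenset]; exact hlen
    have hfixr : IsFixP g r := by
      rw [hr]
      exact root_isFix ⟨rk, hrk⟩ hlen x
    have hfixr' : IsFixP (g.set x r) r := by
      unfold IsFixP
      rw [step_set_ne hrne]
      exact hfixr
    have key : ∀ j z, IsFixP g ((stepF g)^[j] z) → rootS (g.set x r) z = rootS g z := by
      intro j
      induction j with
      | zero =>
        intro z hz
        simp only [Function.iterate_zero_apply] at hz
        have hzx : z ≠ x := fun h => hfx (h ▸ hz)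
        have hz' : IsFixP (g.set x r) z := by
          unfold IsFixP
          rw [step_set_ne hzx]
          exact hz
        rw [root_of_fix hz', root_of_fix hz]
      | succ j ih =>
        intro z hz
        by_cases hfz : IsFixP g z
        · have hzx : z ≠ x := fun h => hfx (h ▸ hfz)
          have hz' : IsFixP (g.set x r) z := by
            unfold IsFixP
            rw [step_set_ne hzx]
            exact hfz
          rw [root_of_fix hz', root_of_fix hfz]
        · by_cases hzx : z = x
          · subst hzx
            have h1 : (stepF (g.set z r))^[1] z = r := by
              simpa using step_set_self hxlt
            rw [reach_root hinv' hlen' h1 hfixr', hr]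
          · have h1 : stepF (g.set x r) z = stepF g z := step_set_ne hzx
            have hz2 : IsFixP g ((stepF g)^[j] (stepF g z)) := by
              rw [← Function.iterate_succ_apply]
              exact hz
            calc rootS (g.set x r) z = rootS (g.set x r) (stepF (g.set x r) z) :=
                  step_root hinv' hlen' z
              _ = rootS (g.set x r) (stepF g z) := by rw [h1]
              _ = rootS g (stepF g z) := ih _ hz2
              _ = rootS g z := (step_root ⟨rk, hrk⟩ hlen z).symm
    refine ⟨hlenset, hinv', fun z => ?_⟩
    obtain ⟨k, _, hk⟩ := exists_fix ⟨rk, hrk⟩ hlen z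
    exact key k z hk

lemma link_root {g : List Nat} (hInv : InvUF g) (hlen : 0 < g.length) {a' b' : Nat}
    (hfa : IsFixP g a') (hfb : IsFixP g b') (hab : a' ≠ b') (ha : a' < g.length) (hb : b' < g.length) :
    (g.set a' b').length = g.length ∧ InvUF (g.set a' b') ∧
      ∀ z, rootS (g.set a' b') z = if rootS g z = a' then b' else rootS g z := by
  have hlenset : (g.set a' b').length = g.length := by simp
  obtain ⟨rk, hrk⟩ := hInv
  have hra : rootS g a' = a' := root_of_fix hfa
  have hrb : rootS g b' = b' := root_of_fix hfb
  have hinv' : InvUF (g.set a' b') := by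
    refine ⟨fun z => if rootS g z = a' then rk z else rk z + rk a' + 1, fun u hu => ?_⟩
    rw [hlenset] at hu
    rcases eq_or_ne u a' with rfl | hune
    · rw [step_set_self hu, hlenset]
      refine ⟨hb, fun _ => ?_⟩
      simp only
      rw [hra, hrb]
      simp [hab.symm]
    · rw [step_set_ne hune, hlenset]
      refine ⟨(hrk u hu).1, fun hne => ?_⟩
      have hsame : rootS g u = rootS g (stepF g u) := step_root ⟨rk, hrk⟩ hlen u
      have := (hrk u hu).2 hne
      simp only
      rw [← hsame]
      split_ifs <;> omega
  have hlen' : 0 < (g.set a' b').length := by rw [hlenset]; exact hlen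
  have hfb' : IsFixP (g.set a' b') b' := by
    unfold IsFixP
    rw [step_set_ne (Ne.symm hab)]
    exact hfb
  have base : ∀ z, IsFixP g z →
      rootS (g.set a' b') z = if rootS g z = a' then b' else rootS g z := by
    intro z hz
    have hrz : rootS g z = z := root_of_fix hz
    rcases eq_or_ne z a' with rfl | hzx
    · have h1 : (stepF (g.set z b'))^[1] z = b' := by
        simpa using step_set_self ha
      rw [reach_root hinv' hlen' h1 hfb', hrz]
      simp
    · have hz' : IsFixP (g.set a' b') z := by
        unfold IsFixP
        rw [step_set_ne hzx]
        exact hz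
      rw [root_of_fix hz', hrz, if_neg hzx]
  have key : ∀ j z, IsFixP g ((stepF g)^[j] z) →
      rootS (g.set a' b') z = if rootS g z = a' then b' else rootS g z := by
    intro j
    induction j with
    | zero =>
      intro z hz
      simp only [Function.iterate_zero_apply] at hz
      exact base z hz
    | succ j ih =>
      intro z hz
      by_cases hfz : IsFixP g z
      · exact base z hfz
      · have hzx : z ≠ a' := fun h => hfz (h ▸ hfa)
        have h1 : stepF (g.set a' b') z = stepF g z := step_set_ne hzx
        have hz2 : IsFixP g ((stepF g)^[j] (stepF g z)) := by
          rw [← Function.iterate_succ_apply]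
          exact hz
        have hsame : rootS g z = rootS g (stepF g z) := step_root ⟨rk, hrk⟩ hlen z
        calc rootS (g.set a' b') z = rootS (g.set a' b') (stepF (g.set a' b') z) :=
              step_root hinv' hlen' z
          _ = rootS (g.set a' b') (stepF g z) := by rw [h1]
          _ = if rootS g (stepF g z) = a' then b' else rootS g (stepF g z) := ih _ hz2
          _ = if rootS g z = a' then b' else rootS g z := by rw [← hsame]
  refine ⟨hlenset, hinv', fun z => ?_⟩
  obtain ⟨k, _, hk⟩ := exists_fix ⟨rk, hrk⟩ hlen z
  exact key k z hk

lemma find_spec : ∀ (fuel : Nat) (g : List Nat) (x : Nat), InvUF g → 0 < g.length →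
    (∃ d < fuel, IsFixP g ((stepF g)^[d] x)) →
    (ufFind fuel g x).1 = rootS g x ∧ (ufFind fuel g x).2.length = g.length ∧
      InvUF (ufFind fuel g x).2 ∧ ∀ z, rootS (ufFind fuel g x).2 z = rootS g z := by
  intro fuel
  induction fuel with
  | zero =>
    intro g x _ _ hd
    obtain ⟨d, hd0, _⟩ := hd
    omega
  | succ fuel ih =>
    intro g x hInv hlen hd
    obtain ⟨d, hdlt, hdfix⟩ := hd
    by_cases hp : stepF g x = x
    · have hp' : g.getD x x = x := hp
      have heq : ufFind (fuel+1) g x = (x, g) := by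
        rw [ufFind]
        have hp2 : g[x]?.getD x = x := by
          rw [← List.getD_eq_getElem?_getD]
          exact hp'
        simp [hp2]
      rw [heq]
      exact ⟨(root_of_fix hp).symm, rfl, hInv, fun z => rfl⟩
    · have hp' : ¬ g.getD x x = x := hp
      have hne0 : d ≠ 0 := by
        rintro rfl
        exact hp (by simpa using hdfix)
      have harg : ∃ d' < fuel, IsFixP g ((stepF g)^[d'] (stepF g x)) := by
        refine ⟨d - 1, by omega, ?_⟩
        rw [← Function.iterate_succ_apply]
        have hd1 : d - 1 + 1 = d := by omega
        simp only [Nat.succ_eq_add_one, hd1]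
        exact hdfix
      obtain ⟨h1, h2, h3, h4⟩ := ih g (stepF g x) hInv hlen harg
      have heq : ufFind (fuel+1) g x =
          ((ufFind fuel g (stepF g x)).1,
            (ufFind fuel g (stepF g x)).2.set x (ufFind fuel g (stepF g x)).1) := by
        rw [ufFind]
        simp only [if_neg hp']
        rfl
      have hr : (ufFind fuel g (stepF g x)).1 = rootS g x := by
        rw [h1, ← step_root hInv hlen]
      have hlen2 : 0 < (ufFind fuel g (stepF g x)).2.length := by
        rw [h2]
        exact hlen
      have hrr : (ufFind fuel g (stepF g x)).1 = rootS (ufFind fuel g (stepF g x)).2 x := by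
        rw [hr, ← h4 x]
      obtain ⟨s1, s2, s3⟩ := set_root h3 hlen2 hrr
      rw [heq]
      refine ⟨hr, by rw [s1, h2], s2, fun z => by rw [s3 z, h4 z]⟩

lemma union_spec {g : List Nat} (hInv : InvUF g) (hlen : 0 < g.length) (a b : Nat)
    (ha : a < g.length) (hb : b < g.length) :
    (ufUnion g a b).length = g.length ∧ InvUF (ufUnion g a b) ∧
      ∀ z, rootS (ufUnion g a b) z = if rootS g z = rootS g a then rootS g b else rootS g z := by
  obtain ⟨e1, f1, i1, r1⟩ := find_spec g.length g a hInv hlen (exists_fix hInv hlen a)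
  have hlen1 : 0 < (ufFind g.length g a).2.length := by rw [f1]; exact hlen
  obtain ⟨e2, f2, i2, r2⟩ := find_spec (ufFind g.length g a).2.length (ufFind g.length g a).2 b i1 hlen1
    (exists_fix i1 hlen1 b)
  have hb1 : (ufFind (ufFind g.length g a).2.length (ufFind g.length g a).2 b).1 = rootS g b := by
    rw [e2, r1 b]
  have hunf : ufUnion g a b =
      if (ufFind g.length g a).1 ≠ (ufFind (ufFind g.length g a).2.length (ufFind g.length g a).2 b).1
      then (ufFind (ufFind g.length g a).2.length (ufFind g.length g a).2 b).2.set
            (ufFind g.length g a).1 (ufFind (ufFind g.length g a).2.length (ufFind g.length g a).2 b).1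
      else (ufFind (ufFind g.length g a).2.length (ufFind g.length g a).2 b).2 := rfl
  set g2 := (ufFind (ufFind g.length g a).2.length (ufFind g.length g a).2 b).2 with hg2
  have f2' : g2.length = g.length := by rw [f2, f1]
  have r2' : ∀ z, rootS g2 z = rootS g z := fun z => by rw [r2 z, r1 z]
  have hlen2 : 0 < g2.length := by rw [f2']; exact hlen
  by_cases hrr : rootS g a = rootS g b
  · rw [hunf, if_neg (by rw [e1, hb1]; simp [hrr])]
    refine ⟨f2', i2, fun z => ?_⟩
    rw [r2' z]
    split_ifs with h
    · rw [h, hrr]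
    · rfl
  · have hfixa : IsFixP g2 (rootS g a) := by
      have h0 : rootS g2 (rootS g a) = rootS g a := by
        rw [r2' _, root_of_fix (root_isFix hInv hlen a)]
      have := root_isFix i2 hlen2 (rootS g a)
      rw [h0] at this
      exact this
    have hfixb : IsFixP g2 (rootS g b) := by
      have h0 : rootS g2 (rootS g b) = rootS g b := by
        rw [r2' _, root_of_fix (root_isFix hInv hlen b)]
      have := root_isFix i2 hlen2 (rootS g b)
      rw [h0] at this
      exact this
    have halt : rootS g a < g2.length := by
      rw [f2']
      exact iter_lt hInv ha g.length
    have hblt : rootS g b < g2.length := by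
      rw [f2']
      exact iter_lt hInv hb g.length
    obtain ⟨l1, l2, l3⟩ := link_root i2 hlen2 hfixa hfixb hrr halt hblt
    rw [hunf, if_pos (by rw [e1, hb1]; simp [hrr]), e1, hb1]
    refine ⟨by rw [l1, f2'], l2, fun z => ?_⟩
    rw [l3 z, r2' z]

lemma conn_spec {g : List Nat} (hInv : InvUF g) (hlen : 0 < g.length) (a b : Nat) :
    (ufConn g a b).1 = (rootS g a == rootS g b) ∧ (ufConn g a b).2.length = g.length ∧
      InvUF (ufConn g a b).2 ∧ ∀ z, rootS (ufConn g a b).2 z = rootS g z := by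
  obtain ⟨e1, f1, i1, r1⟩ := find_spec g.length g a hInv hlen (exists_fix hInv hlen a)
  have hlen1 : 0 < (ufFind g.length g a).2.length := by rw [f1]; exact hlen
  obtain ⟨e2, f2, i2, r2⟩ := find_spec (ufFind g.length g a).2.length (ufFind g.length g a).2 b i1 hlen1
    (exists_fix i1 hlen1 b)
  have hunf : ufConn g a b =
      ((ufFind g.length g a).1 == (ufFind (ufFind g.length g a).2.length (ufFind g.length g a).2 b).1,
        (ufFind (ufFind g.length g a).2.length (ufFind g.length g a).2 b).2) := rfl
  rw [hunf]
  exact ⟨by rw [e1, e2, r1 b], by rw [f2, f1], i2, fun z => by rw [r2 z, r1 z]⟩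

-- ---- the colour-array side ----
def Corr (g comp : List Nat) : Prop :=
  ∀ x y, x < g.length → y < g.length →
    (rootS g x = rootS g y ↔ comp.getD x 0 = comp.getD y 0)

def ufApply (g : List Nat) (p : Nat × Nat) : List Nat := ufUnion g p.1 p.2

set_option maxHeartbeats 1000000 in
lemma pair_step {g comp : List Nat} (hInv : InvUF g) (hlen : 0 < g.length)
    (hlc : comp.length = g.length) (hC : Corr g comp) {a b : Nat}
    (ha : a < g.length) (hb : b < g.length) :
    (ufApply g (a, b)).length = g.length ∧ (relabel comp (a, b)).length = g.length ∧
      InvUF (ufApply g (a, b)) ∧ Corr (ufApply g (a, b)) (relabel comp (a, b)) := by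
  obtain ⟨u1, u2, u3⟩ := union_spec hInv hlen a b ha hb
  have hgetD : ∀ (f : Nat → Nat) (x : Nat), x < g.length →
      (comp.map f).getD x 0 = f (comp.getD x 0) := by
    intro f x hx
    rw [← hlc] at hx
    rw [List.getD_eq_getElem _ _ hx, List.getD_eq_getElem _ _ (by simpa using hx)]
    simp
  have hap : ufApply g (a, b) = ufUnion g a b := rfl
  by_cases hcc : comp.getD a 0 = comp.getD b 0
  · have hcc' : comp[a]?.getD 0 = comp[b]?.getD 0 := by
      rw [← List.getD_eq_getElem?_getD, ← List.getD_eq_getElem?_getD]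
      exact hcc
    have hre : relabel comp (a, b) = comp := by
      simp [relabel, hcc']
    have hab' : rootS g a = rootS g b := (hC a b ha hb).mpr hcc
    have hval : ∀ z, rootS (ufUnion g a b) z = rootS g z := by
      intro z
      rw [u3 z]
      split_ifs with h
      · exact (h.trans hab').symm
      · rfl
    refine ⟨u1, by rw [hre]; exact hlc, u2, ?_⟩
    intro x y hx hy
    rw [hap, u1] at hx hy
    rw [hap, hre, hval x, hval y]
    exact hC x y hx hy
  · have hcc' : ¬ comp[a]?.getD 0 = comp[b]?.getD 0 := by
      rw [← List.getD_eq_getElem?_getD, ← List.getD_eq_getElem?_getD]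
      exact hcc
    have hre : relabel comp (a, b) = comp.map (fun c => if c = comp.getD a 0 then comp.getD b 0 else c) := by
      simp only [relabel, List.getD_eq_getElem?_getD]
      rw [if_pos hcc']
    have hrab : rootS g a ≠ rootS g b := fun h => hcc ((hC a b ha hb).mp h)
    refine ⟨u1, by rw [hre]; simpa using hlc, u2, ?_⟩
    intro x y hx hy
    rw [hap, u1] at hx hy
    rw [hap, hre, u3 x, u3 y, hgetD _ x hx, hgetD _ y hy]
    have hxa := hC x a hx ha
    have hya := hC y a hy ha
    have hbx := hC b x hb hx
    have hby := hC b y hb hy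
    have hxy := hC x y hx hy
    split_ifs <;> tauto

lemma fold_pairs : ∀ (ps : List (Nat × Nat)) (g comp : List Nat), InvUF g → 0 < g.length →
    comp.length = g.length → Corr g comp → (∀ p ∈ ps, p.1 < g.length ∧ p.2 < g.length) →
    (ps.foldl ufApply g).length = g.length ∧ (ps.foldl relabel comp).length = g.length ∧
      InvUF (ps.foldl ufApply g) ∧ Corr (ps.foldl ufApply g) (ps.foldl relabel comp) := by
  intro ps
  induction ps with
  | nil =>
    intro g comp hInv hlen hlc hC _
    exact ⟨rfl, hlc, hInv, hC⟩
  | cons p ps ih =>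
    intro g comp hInv hlen hlc hC hb
    obtain ⟨a, b⟩ := p
    have hpa := (hb (a, b) List.mem_cons_self).1
    have hpb := (hb (a, b) List.mem_cons_self).2
    obtain ⟨q1, q2, q3, q4⟩ := pair_step hInv hlen hlc hC hpa hpb
    simp only [List.foldl_cons]
    obtain ⟨w1, w2, w3, w4⟩ := ih (ufApply g (a, b)) (relabel comp (a, b)) q3
      (by rw [q1]; exact hlen) (by rw [q2, q1]) q4
      (by
        intro p' hp'
        rw [q1]
        exact hb p' (List.mem_cons_of_mem _ hp'))
    exact ⟨by rw [w1, q1], by rw [w2, q1], w3, w4⟩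

-- ---- phase 1: A's interleaved unions = fold of B's pair list ----
def emitJ (xC yC : Int) (circles : List (List Int)) (i : Nat) (x y r : Int) (j : Nat) : List (Nat × Nat) :=
  match circles.getD j [] with
  | [xj, yj, rj] =>
    if (xj - x)^2 + (yj - y)^2 ≤ (rj + r)^2 ∧ x*rj + xj*r < (r+rj)*xC ∧ y*rj + yj*r < (r+rj)*yC
    then [(i, j)] else []
  | _ => []

lemma bInner_eq_flatMap (xC yC : Int) (circles : List (List Int)) (i : Nat) (x y r : Int)
    (ps : List (Nat × Nat)) :
    bInner xC yC circles i x y r ps = ps ++ (List.range i).flatMap (emitJ xC yC circles i x y r) := by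
  unfold bInner
  rw [PySem.List.foldl_congr_mem (List.range i) _
    (fun ps j => ps ++ emitJ xC yC circles i x y r j) ps ?hcong]
  · exact PySem.List.foldl_append_eq_flatMap _ _ _
  case hcong =>
    intro acc j _
    unfold emitJ
    rcases h : circles.getD j [] with _ | ⟨xj, _ | ⟨yj, _ | ⟨rj, _ | ⟨w, t⟩⟩⟩⟩ <;>
      simp only [h] <;> (try split_ifs) <;> simp
lemma foldl_flat {σ δ α : Type} (f : σ → δ → σ) (emit : α → List δ) :
    ∀ (l : List α) (s : σ),
      l.foldl (fun s j => (emit j).foldl f s) s = (l.flatMap emit).foldl f s := by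
  intro l
  induction l with
  | nil => intro s; simp
  | cons a l ih => intro s; simp [List.foldl_append, ih]

lemma aInner_eq (xC yC : Int) (circles : List (List Int)) (i : Nat) (x y r : Int) (g : List Nat) :
    aInner xC yC circles i x y r g =
      (bInner xC yC circles i x y r []).foldl ufApply g := by
  rw [bInner_eq_flatMap]
  unfold aInner
  rw [PySem.List.foldl_congr_mem (List.range i) _
    (fun g j => (emitJ xC yC circles i x y r j).foldl ufApply g) g ?hcong]
  · rw [foldl_flat]
    simp
  case hcong =>
    intro acc j _
    unfold emitJ
    rcases h : circles.getD j [] with _ | ⟨xj, _ | ⟨yj, _ | ⟨rj, _ | ⟨w, t⟩⟩⟩⟩ <;>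
      simp only [h] <;> (try split_ifs) <;> simp [ufApply]

lemma bStep_append (xC yC : Int) (circles : List (List Int)) (n : Nat) (ps : List (Nat × Nat))
    (ic : List Int × Nat) :
    bStep xC yC circles n ps ic = ps ++ bStep xC yC circles n [] ic := by
  obtain ⟨c, i⟩ := ic
  rcases c with _ | ⟨x, _ | ⟨y, _ | ⟨r, _ | ⟨w, t⟩⟩⟩⟩ <;> simp only [bStep] <;> try simp
  split_ifs <;> simp [bInner_eq_flatMap, List.append_assoc]

lemma aStep_eq (xC yC : Int) (circles : List (List Int)) (n : Nat) (g : List Nat)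
    (ic : List Int × Nat) :
    aStep xC yC circles n g ic = (bStep xC yC circles n [] ic).foldl ufApply g := by
  obtain ⟨c, i⟩ := ic
  rcases c with _ | ⟨x, _ | ⟨y, _ | ⟨r, _ | ⟨w, t⟩⟩⟩⟩ <;> simp only [aStep, bStep] <;> try simp
  split_ifs <;>
    simp [aInner_eq, bInner_eq_flatMap, List.foldl_append, ufApply]

lemma outer_eq (xC yC : Int) (circles : List (List Int)) (n : Nat) :
    ∀ (l : List (List Int × Nat)) (g : List Nat) (ps : List (Nat × Nat)),
      l.foldl (aStep xC yC circles n) ((ps.foldl ufApply g)) =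
        (l.foldl (bStep xC yC circles n) ps).foldl ufApply g := by
  intro l
  induction l with
  | nil => intro g ps; simp
  | cons ic l ih =>
    intro g ps
    simp only [List.foldl_cons]
    have h1 : aStep xC yC circles n (ps.foldl ufApply g) ic
        = (bStep xC yC circles n ps ic).foldl ufApply g := by
      rw [aStep_eq, ← List.foldl_append, ← bStep_append]
    rw [h1, ih]

lemma mem_bstep (xC yC : Int) (circles : List (List Int)) (n : Nat) (ic : List Int × Nat)
    (hi : ic.2 < n) :
    ∀ p ∈ bStep xC yC circles n [] ic, p.1 < n + 4 ∧ p.2 < n + 4 := by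
  obtain ⟨c, i⟩ := ic
  simp only at hi
  have hmemJ : ∀ x y r j p, p ∈ emitJ xC yC circles i x y r j → p = (i, j) := by
    intro x y r j p hp
    unfold emitJ at hp
    rcases h : circles.getD j [] with _ | ⟨xj, _ | ⟨yj, _ | ⟨rj, _ | ⟨w, t⟩⟩⟩⟩ <;>
      rw [h] at hp <;> (try split_ifs at hp) <;> simp at hp <;> simp [hp]
  have step : ∀ (p : Nat × Nat) (S : List (Nat × Nat)) (cnd : Prop) [Decidable cnd] (e : Nat × Nat),
      p ∈ (if cnd then S ++ [e] else S) → p ∈ S ∨ p = e := by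
    intro p S cnd _ e h
    split_ifs at h
    · simpa using h
    · exact Or.inl h
  rcases c with _ | ⟨x, _ | ⟨y, _ | ⟨r, _ | ⟨w, t⟩⟩⟩⟩ <;> simp only [bStep] <;>
    try (intro p hp; simp at hp; done)
  intro p hp
  by_cases hskip : (xC ≤ x - r ∨ yC ≤ y - r)
  · rw [if_pos hskip] at hp
    simp at hp
  · rw [if_neg hskip] at hp
    rcases step p _ _ _ hp with hp | rfl
    · rcases step p _ _ _ hp with hp | rfl
      · rcases step p _ _ _ hp with hp | rfl
        · rcases step p _ _ _ hp with hp | rfl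
          · rw [bInner_eq_flatMap] at hp
            simp only [List.nil_append, List.mem_flatMap, List.mem_range] at hp
            obtain ⟨j, hj, hpj⟩ := hp
            have hpe := hmemJ x y r j p hpj
            subst hpe
            exact ⟨by omega, by omega⟩
          · exact ⟨by omega, by omega⟩
        · exact ⟨by omega, by omega⟩
      · exact ⟨by omega, by omega⟩
    · exact ⟨by omega, by omega⟩

lemma mem_fold_bstep (xC yC : Int) (circles : List (List Int)) (n : Nat) :
    ∀ (l : List (List Int × Nat)) (ps : List (Nat × Nat)), (∀ ic ∈ l, ic.2 < n) →
      (∀ p ∈ ps, p.1 < n + 4 ∧ p.2 < n + 4) →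
      ∀ p ∈ l.foldl (bStep xC yC circles n) ps, p.1 < n + 4 ∧ p.2 < n + 4 := by
  intro l
  induction l with
  | nil => intro ps _ hps; exact hps
  | cons ic l ih =>
    intro ps hl hps
    simp only [List.foldl_cons]
    apply ih _ (fun ic' h => hl ic' (List.mem_cons_of_mem _ h))
    intro p hp
    rw [bStep_append] at hp
    rcases List.mem_append.mp hp with h | h
    · exact hps p h
    · exact mem_bstep xC yC circles n ic (hl ic List.mem_cons_self) p h

lemma range_fix (m : Nat) : ∀ z, stepF (List.range m) z = z := by
  intro z
  rcases Nat.lt_or_ge z m with h | h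
  · simp [stepF, List.getD_eq_getElem?_getD, List.getElem?_range, h]
  · exact stepF_of_ge (by simpa using h)

-- ===== VERDICT (by name: the statement is the Claim_ definition above) =====
theorem canReachCorner_spec : Claim_equal_canReachCorner := by
  intro xCorner yCorner circles _ _
  unfold Spec_canReachCorner
  simp only [canReachCorner, canReachCorner_alt]
  set n := circles.length with hn
  set g0 := List.range (n + 4) with hg0
  set pairs := circles.zipIdx.foldl (bStep xCorner yCorner circles n) [] with hpairs
  have houter : circles.zipIdx.foldl (aStep xCorner yCorner circles n) g0 =
      pairs.foldl ufApply g0 := by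
    have h := outer_eq xCorner yCorner circles n circles.zipIdx g0 []
    simpa using h
  have hbnd : ∀ p ∈ pairs, p.1 < n + 4 ∧ p.2 < n + 4 := by
    refine mem_fold_bstep xCorner yCorner circles n circles.zipIdx [] ?_ (by simp)
    intro ic h
    have := List.mem_zipIdx h
    omega
  have hfix0 : ∀ z, stepF g0 z = z := range_fix (n + 4)
  have hinv0 : InvUF g0 := ⟨fun _ => 0, fun x hx => ⟨by rw [hfix0 x]; exact hx,
    fun h => absurd (hfix0 x) h⟩⟩
  have hroot0 : ∀ z, rootS g0 z = z := fun z => root_of_fix (hfix0 z)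
  have hlen0 : 0 < g0.length := by simp [hg0]
  have hgd0 : ∀ x, x < n + 4 → g0.getD x 0 = x := by
    intro x hx
    rw [hg0, List.getD_eq_getElem _ _ (by simpa using hx)]
    simp
  have hC0 : Corr g0 g0 := by
    intro x y hx hy
    rw [hg0, List.length_range] at hx hy
    rw [hroot0, hroot0, hgd0 x hx, hgd0 y hy]
  obtain ⟨w1, w2, w3, w4⟩ := fold_pairs pairs g0 g0 hinv0 hlen0 rfl hC0
    (by rw [hg0, List.length_range]; exact hbnd)
  rw [houter]
  set G := pairs.foldl ufApply g0 with hG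
  set C := pairs.foldl relabel g0 with hC
  have hlenG : 0 < G.length := by rw [w1]; exact hlen0
  obtain ⟨d1, e1, i1, r1⟩ := conn_spec w3 hlenG n (n + 1)
  obtain ⟨d2, e2, i2, r2⟩ := conn_spec i1 (by rw [e1]; exact hlenG) n (n + 2)
  obtain ⟨d3, e3, i3, r3⟩ := conn_spec i2 (by rw [e2, e1]; exact hlenG) (n + 3) (n + 2)
  obtain ⟨d4, _, _, _⟩ := conn_spec i3 (by rw [e3, e2, e1]; exact hlenG) (n + 3) (n + 1)
  have hco : ∀ u v, u < n + 4 → v < n + 4 →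
      ((rootS G u == rootS G v) = (C.getD u 0 == C.getD v 0)) := by
    intro u v hu hv
    rw [Bool.eq_iff_iff]
    simp only [beq_iff_eq]
    exact w4 u v (by rw [w1, hg0, List.length_range]; exact hu)
      (by rw [w1, hg0, List.length_range]; exact hv)
  rw [d1, d2, d3, d4, r1, r1, r2 (n + 3), r2 (n + 2), r1 (n + 3), r1 (n + 2),
    r3 (n + 3), r3 (n + 1), r2 (n + 3), r2 (n + 1), r1 (n + 3), r1 (n + 1)]
  rw [hco n (n + 1) (by omega) (by omega), hco n (n + 2) (by omega) (by omega),
    hco (n + 3) (n + 2) (by omega) (by omega), hco (n + 3) (n + 1) (by omega) (by omega)]
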